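-- pv_equiv track=rewrite | github.com/CodingKomodo/AdventOfCode2023 | Day2/code2.py | find_power
-- ===== SOURCE A (Python) =====
-- def find_power(full_game):
--     min_vals = [0, 0, 0]
--     for trial in full_game:
--         if trial[0] > min_vals[0]:
--             min_vals[0] = trial[0]
--         if trial[1] > min_vals[1]:
--             min_vals[1] = trial[1]
--         if trial[2] > min_vals[2]:
--             min_vals[2] = trial[2]
--     return min_vals[0] * min_vals[1] * min_vals[2]
-- ===== SOURCE B (Python) =====
-- def find_power(full_game):
--     xs = sorted([0] + [t[0] for t in full_game])
--     ys = sorted([0] + [t[1] for t in full_game])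
--     zs = sorted([0] + [t[2] for t in full_game])
--     return xs[-1] * ys[-1] * zs[-1]
-- ===== Notes on version B (the rewrite author's own statement) =====
-- stated objective: alternative
-- what changed: Replaces the fused running-max loop with sort-then-take-last: each column (with 0 prepended as the floor) is sorted and its last element taken, so no comparison loop or max reduction is written at all.
import Mathlib
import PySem

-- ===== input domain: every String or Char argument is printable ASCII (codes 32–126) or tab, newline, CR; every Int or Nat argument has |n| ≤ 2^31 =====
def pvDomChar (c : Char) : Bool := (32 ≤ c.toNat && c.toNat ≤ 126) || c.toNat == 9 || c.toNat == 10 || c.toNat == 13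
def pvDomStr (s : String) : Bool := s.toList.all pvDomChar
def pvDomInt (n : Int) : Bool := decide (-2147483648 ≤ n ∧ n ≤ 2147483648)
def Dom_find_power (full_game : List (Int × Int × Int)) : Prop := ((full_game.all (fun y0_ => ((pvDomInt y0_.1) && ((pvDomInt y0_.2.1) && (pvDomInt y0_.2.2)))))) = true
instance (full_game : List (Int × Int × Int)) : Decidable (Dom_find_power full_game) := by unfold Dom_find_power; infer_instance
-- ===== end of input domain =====

-- ===== PORT A =====
-- One honest line: B sorts each column (with 0 prepended as the floor) and takes the last
-- element, instead of A's fused running-max loop over a 3-slot state (alternative algorithm).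
def find_power (full_game : List (Int × Int × Int)) : Int :=
  let m := full_game.foldl
    (fun (mv : Int × Int × Int) trial =>
      let m0 := if trial.1 > mv.1 then trial.1 else mv.1
      let m1 := if trial.2.1 > mv.2.1 then trial.2.1 else mv.2.1
      let m2 := if trial.2.2 > mv.2.2 then trial.2.2 else mv.2.2
      (m0, m1, m2)) (0, 0, 0)
  m.1 * m.2.1 * m.2.2

-- ===== PORT B =====
-- sorted([0] + col)[-1]: the list is nonempty (0 is prepended), so xs[-1] never raises;
-- pyGetD with a default is exact here.
def sortedLast (col : List Int) : Int :=
  PySem.List.pyGetD (PySem.List.sorted (0 :: col) (fun x => x) false) (-1) 0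

def find_power_alt (full_game : List (Int × Int × Int)) : Int :=
  let xs := sortedLast (full_game.map (·.1))
  let ys := sortedLast (full_game.map (·.2.1))
  let zs := sortedLast (full_game.map (·.2.2))
  xs * ys * zs

-- ===== PRECONDITION & SPEC =====
def Spec_find_power (full_game : List (Int × Int × Int)) (out : Int) : Prop := out = find_power_alt full_game
instance (full_game : List (Int × Int × Int)) (out : Int) : Decidable (Spec_find_power full_game out) := by unfold Spec_find_power; infer_instance

-- ===== CLAIM =====
def Claim_equal_find_power : Prop := ∀ (full_game : List (Int × Int × Int)), Dom_find_power full_game → Spec_find_power full_game (find_power full_game)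

-- ===== LEMMAS AND PROOFS =====
lemma ite_gt_max (a b : Int) : (if b > a then b else a) = max a b := by
  simp [max_def]; split_ifs <;> omega

lemma loopA_eq (full_game : List (Int × Int × Int)) (s0 s1 s2 : Int) :
    full_game.foldl
      (fun (mv : Int × Int × Int) trial =>
        let m0 := if trial.1 > mv.1 then trial.1 else mv.1
        let m1 := if trial.2.1 > mv.2.1 then trial.2.1 else mv.2.1
        let m2 := if trial.2.2 > mv.2.2 then trial.2.2 else mv.2.2
        (m0, m1, m2)) (s0, s1, s2)
      = ((full_game.map (·.1)).foldl max s0,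
         (full_game.map (·.2.1)).foldl max s1,
         (full_game.map (·.2.2)).foldl max s2) := by
  induction full_game generalizing s0 s1 s2 with
  | nil => simp
  | cons t ts ih =>
    simp only [List.foldl_cons, List.map_cons]
    rw [ih]
    simp only [ite_gt_max]

-- in a (·≤·)-pairwise list, every member is ≤ the last element
lemma mem_le_getLast (l : List Int) (hp : l.Pairwise (· ≤ ·)) (hne : l ≠ []) :
    ∀ y ∈ l, y ≤ l.getLast hne := by
  induction l with
  | nil => simp at hne
  | cons a t ih =>
    intro y hy
    rcases List.pairwise_cons.mp hp with ⟨ha, hpt⟩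
    cases t with
    | nil => simp at hy; simp [hy, List.getLast]
    | cons b u =>
      have hlast : (a :: b :: u).getLast (by simp) = (b :: u).getLast (by simp) := by
        simp [List.getLast]
      rw [hlast]
      rcases List.mem_cons.mp hy with h | h
      · subst h
        have hb : (b :: u).getLast (by simp) ∈ (b :: u) := List.getLast_mem _
        exact le_trans (le_refl y) (ha _ hb)
      · exact ih hpt (by simp) y h

lemma sortedLast_eq (col : List Int) : sortedLast col = col.foldl max 0 := by
  unfold sortedLast
  have hne : PySem.List.sorted (0 :: col) (fun x => x) false ≠ [] := by
    simp [PySem.List.sorted_eq_nil_iff]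
  rw [PySem.List.pyGetD_neg_one _ _ hne]
  set s := PySem.List.sorted (0 :: col) (fun x => x) false with hs
  have hperm : s.Perm (0 :: col) := PySem.List.sorted_perm _ _ _
  have hpw : s.Pairwise (· ≤ ·) := by
    have := PySem.List.sorted_pairwise (0 :: col) (fun x => x)
    simpa using this
  -- the last element of s is ≥ every member, and is a member of 0 :: col
  have hmemL : s.getLast hne ∈ (0 :: col) := hperm.mem_iff.mp (List.getLast_mem hne)
  have hub : ∀ y ∈ (0 :: col), y ≤ s.getLast hne := by
    intro y hy
    exact mem_le_getLast s hpw hne y (hperm.mem_iff.mpr hy)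
  have hfold := PySem.List.le_foldl_max col 0
  apply le_antisymm
  · rcases List.mem_cons.mp hmemL with h | h
    · rw [h]; exact hfold.1
    · exact hfold.2 _ h
  · rcases PySem.List.foldl_max_mem col 0 with h | h
    · rw [h]; exact hub 0 (by simp)
    · exact hub _ (by simp [h])

-- ===== VERDICT =====
theorem find_power_spec : Claim_equal_find_power := by
  intro full_game _
  unfold Spec_find_power find_power find_power_alt
  rw [loopA_eq]
  simp only [sortedLast_eq]
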